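-- pv_equiv track=rewrite | github.com/Hk4Fun/algorithm_offer | 41_2_和为s的连续正整数序列.py | FindContinuousSequence4
-- ===== SOURCE A (Python) =====
-- def FindContinuousSequence4(sum):
--     from math import sqrt
--     if sum < 3:
--         return []
--     result = []
--     # 同思路3，当n从由大至小遍历时，可以保证序列间按照开始数字从小到大的顺序
--     for n in range(int(sqrt(sum << 1)), 1, -1):
--         if (n & 1 == 1 and sum % n == 0) or (n & 1 == 0 and ((sum % n) << 1) == n):
--             first = (sum // n) - ((n - 1) >> 1)
--             result.append(list(range(first, first + n)))
--     return result
-- ===== SOURCE B (Python) =====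
-- def FindContinuousSequence4(sum):
--     # odd-divisor method: each sequence of consecutive positive integers with
--     # total sum corresponds to exactly one odd divisor d > 1 of sum (write
--     # 2*sum = n*m with n = length = min(d, 2*sum//d) and m = max of the two);
--     # enumerate the divisors of the odd part of sum in pairs up to its square
--     # root, turn each odd divisor > 1 into its sequence, sort by first element.
--     from math import isqrt
--     if sum < 3:
--         return []
--     odd = sum
--     while odd % 2 == 0:
--         odd //= 2
--     divisors = []
--     for i in range(1, isqrt(odd) + 1):
--         if odd % i == 0:
--             divisors.append(i)
--             if i * i != odd:
--                 divisors.append(odd // i)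
--     runs = []
--     for d in divisors:
--         if d > 1:
--             c = 2 * sum // d
--             n = d if d < c else c
--             a = (d + c - 2 * n + 1) // 2
--             runs.append((a, n))
--     runs.sort(key=lambda t: t[0])
--     return [list(range(a, a + n)) for (a, n) in runs]
-- ===== Notes on version B (the rewrite author's own statement) =====
-- stated objective: alternative
-- what changed: Replaces A's direct scan over candidate sequence lengths with its per-length parity/divisibility test by the number-theoretic odd-divisor method: strip the factor 2^k from sum, enumerate the divisors of the odd part in pairs up to its square root, map each odd divisor > 1 to its sequence via the factorization 2*sum = length * (first+last), and sort the sequences by first element.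
import Mathlib
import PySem

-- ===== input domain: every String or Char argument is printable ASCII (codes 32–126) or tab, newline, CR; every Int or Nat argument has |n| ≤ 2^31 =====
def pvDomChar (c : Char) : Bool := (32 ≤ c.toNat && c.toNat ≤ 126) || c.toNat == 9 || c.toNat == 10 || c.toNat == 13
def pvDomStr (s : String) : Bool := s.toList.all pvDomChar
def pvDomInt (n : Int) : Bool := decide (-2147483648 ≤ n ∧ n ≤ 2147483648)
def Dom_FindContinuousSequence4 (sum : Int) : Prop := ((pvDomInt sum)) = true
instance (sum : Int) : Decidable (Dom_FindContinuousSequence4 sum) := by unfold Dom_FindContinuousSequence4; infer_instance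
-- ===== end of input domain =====

-- B replaces A's scan over candidate lengths (parity/divisibility test per length)
-- by the odd-divisor method: strip the factor 2^k from sum, enumerate the divisors
-- of the odd part in pairs up to its square root, map each odd divisor > 1 to its
-- sequence via 2*sum = length * (first + last), and sort by first element.

-- ===== PORT A =====
-- A-side helpers: the loop-body condition and the appended sequence, named for readability.
-- 'n & 1 == 1' / 'n & 1 == 0' is 'n % 2 == 1' / '== 0' (equal in Python for every int),
-- '(x) << 1' is 'x * 2', and '(n - 1) >> 1' is '(n - 1) // 2' (equal in Python for every int).
def pvCondA (sum n : Int) : Bool :=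
  (PySem.Int.mod n 2 == 1 && PySem.Int.mod sum n == 0)
    || (PySem.Int.mod n 2 == 0 && PySem.Int.mod sum n * 2 == n)

-- first = (sum // n) - ((n - 1) >> 1); list(range(first, first + n))
def pvSeqA (sum n : Int) : List Int :=
  PySem.List.pyRange (PySem.Int.floordiv sum n - PySem.Int.floordiv (n - 1) 2)
    (PySem.Int.floordiv sum n - PySem.Int.floordiv (n - 1) 2 + n) 1

-- 'int(sqrt(sum << 1))': for 3 ≤ sum ≤ 2^31 we have 2*sum ≤ 2^32 < 2^53, where math.sqrt is
-- correctly rounded and int() truncates to exactly the integer square root, so it is ported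
-- as Nat.sqrt (exact on this domain).
def FindContinuousSequence4 (sum : Int) : List (List Int) :=
  if sum < 3 then []
  else
    (PySem.List.pyRange ((Nat.sqrt (2 * sum).toNat : Int)) 1 (-1)).foldl
      (fun result n => if pvCondA sum n then result ++ [pvSeqA sum n] else result) []

-- ===== PORT B =====
-- 'while odd % 2 == 0: odd //= 2'; the fuel only makes the loop total, the proof
-- shows it is never exhausted for the inputs reached (sum ≥ 3)
def pvOddPart : Nat → Int → Int
  | 0, x => x
  | f + 1, x =>
    if PySem.Int.mod x 2 == 0 then pvOddPart f (PySem.Int.floordiv x 2) else x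

-- loop body of 'for i in range(1, isqrt(odd) + 1): …' collecting divisor pairs
def pvDivStep (o : Int) (acc : List Int) (i : Int) : List Int :=
  if PySem.Int.mod o i == 0 then
    let acc1 := acc ++ [i]
    if i * i ≠ o then acc1 ++ [PySem.Int.floordiv o i] else acc1
  else acc

-- c = 2*sum//d; n = d if d < c else c; a = (d + c - 2*n + 1)//2; the pair (a, n)
def pvMkRun (sum d : Int) : Int × Int :=
  let c := PySem.Int.floordiv (2 * sum) d
  let n := if d < c then d else c
  (PySem.Int.floordiv (d + c - 2 * n + 1) 2, n)

-- 'from math import isqrt': isqrt is exact integer sqrt, ported as Nat.sqrt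
def FindContinuousSequence4_alt (sum : Int) : List (List Int) :=
  if sum < 3 then []
  else
    let odd := pvOddPart sum.toNat sum
    let divisors :=
      (PySem.List.pyRange 1 ((Nat.sqrt odd.toNat : Int) + 1) 1).foldl (pvDivStep odd) []
    let runs :=
      divisors.foldl (fun runs d => if 1 < d then runs ++ [pvMkRun sum d] else runs) []
    (PySem.List.sorted runs (fun t => t.1) false).map
      (fun t => PySem.List.pyRange t.1 (t.1 + t.2) 1)

-- ===== PRECONDITION & SPEC =====
def Spec_FindContinuousSequence4 (sum : Int) (out : List (List Int)) : Prop := out = FindContinuousSequence4_alt sum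
instance (sum : Int) (out : List (List Int)) : Decidable (Spec_FindContinuousSequence4 sum out) := by unfold Spec_FindContinuousSequence4; infer_instance

-- ===== CLAIM (what is proved, stated in full; the proofs are below) =====
def Claim_equal_FindContinuousSequence4 : Prop := ∀ (sum : Int), Dom_FindContinuousSequence4 sum → Spec_FindContinuousSequence4 sum (FindContinuousSequence4 sum)

-- ===== LEMMAS AND PROOFS =====

-- validity of a run [a..e]  (e² + e = a² - a + 2·sum  ⇔  (a+e)(e-a+1) = 2·sum)
def pvValid (sum a e : Int) : Prop := 1 ≤ a ∧ a + 1 ≤ e ∧ e * e + e = a * a - a + 2 * sum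

-- n ≤ ⌊√x⌋ ↔ n² ≤ x (for 0 ≤ n, 0 ≤ x)
theorem pvle_sqrt (x n : Int) (hn : 0 ≤ n) (hx : 0 ≤ x) :
    n ≤ ((Nat.sqrt x.toNat : Nat) : Int) ↔ n * n ≤ x := by
  obtain ⟨m, rfl⟩ := Int.eq_ofNat_of_zero_le hn
  obtain ⟨y, rfl⟩ := Int.eq_ofNat_of_zero_le hx
  rw [Int.toNat_natCast]
  constructor
  · intro h
    have hm : m ≤ Nat.sqrt y := by exact_mod_cast h
    have := Nat.le_sqrt.1 hm
    exact_mod_cast this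
  · intro h
    have hm : m * m ≤ y := by exact_mod_cast h
    have := Nat.le_sqrt.2 hm
    exact_mod_cast this

-- head of a run
theorem pvHeadRange (a b : Int) (h : a < b) : (PySem.List.pyRange a b 1).headI = a := by
  rw [PySem.List.pyRange_one_cons h]; rfl

-- uniqueness of the end of a run for a given start
theorem pvEndUnique (sum a e e' : Int) (hae : a + 1 ≤ e) (hae' : a + 1 ≤ e')
    (h : e * e + e = a * a - a + 2 * sum) (h' : e' * e' + e' = a * a - a + 2 * sum)
    (ha : 1 ≤ a) : e = e' := by
  nlinarith [sq_nonneg (e - e'), sq_nonneg (e + e')]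

-- an odd number divides twice a number only if it divides the number itself
theorem pvOddDvd (d x : Int) (hd : d % 2 = 1) (h : d ∣ 2 * x) : d ∣ x := by
  obtain ⟨t, ht⟩ := h
  have h2 : (2:Int) ∣ d * t := ⟨x, by linarith⟩
  rcases (Int.prime_two.dvd_mul).1 h2 with h2d | h2t
  · exfalso
    obtain ⟨k, hk⟩ := h2d
    omega
  · obtain ⟨u, hu⟩ := h2t
    refine ⟨u, ?_⟩
    have h3 : d * t = 2 * (d * u) := by rw [hu]; ring
    omega

-- A's test equals the unified divisibility test on 2·sum (the two parity branches merged)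
def pvCondB (double n : Int) : Bool :=
  PySem.Int.mod double n == 0
    && PySem.Int.mod (PySem.Int.floordiv double n - n) 2 == 1

theorem pvCond_eq (sum n : Int) (hn : 2 ≤ n) :
    pvCondA sum n = pvCondB (2 * sum) n := by
  have hpos : (0:Int) < n := by omega
  have h2 : (0:Int) < 2 := by norm_num
  have hne : n ≠ 0 := by omega
  rw [Bool.eq_iff_iff]
  simp only [pvCondA, pvCondB, PySem.Int.mod_eq_emod_of_pos hpos,
    PySem.Int.mod_eq_emod_of_pos h2, PySem.Int.floordiv_eq_ediv_of_pos hpos,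
    Bool.or_eq_true, Bool.and_eq_true, beq_iff_eq]
  constructor
  · rintro (⟨hodd, hS0⟩ | ⟨heven, hhalf⟩)
    · obtain ⟨t, ht⟩ := Int.dvd_of_emod_eq_zero hS0
      have hD : 2 * sum = n * (2 * t) := by rw [ht]; ring
      refine ⟨by rw [hD]; exact Int.mul_emod_right n _, ?_⟩
      rw [hD, Int.mul_ediv_cancel_left _ hne]; omega
    · set u := sum % n with hu
      have hSn : n * (sum / n) + sum % n = sum := Int.ediv_add_emod sum n
      have hD : 2 * sum = n * (2 * (sum / n) + 1) := by
        have : n = 2 * u := by omega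
        nlinarith [hSn]
      refine ⟨by rw [hD]; exact Int.mul_emod_right n _, ?_⟩
      rw [hD, Int.mul_ediv_cancel_left _ hne]; omega
  · rintro ⟨h0, h1⟩
    have hD : 2 * sum = n * (2 * sum / n) := by
      have := Int.ediv_add_emod (2 * sum) n; omega
    set q := 2 * sum / n with hq
    rcases Int.emod_two_eq n with hpar | hpar
    · -- n even
      right
      refine ⟨hpar, ?_⟩
      have hqodd : q % 2 = 1 := by omega
      obtain ⟨u, huu⟩ : ∃ u, n = 2 * u := ⟨n / 2, by omega⟩
      obtain ⟨t, htt⟩ : ∃ t, q = 2 * t + 1 := ⟨q / 2, by omega⟩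
      have hS : sum = u + n * t := by nlinarith [hD]
      have : sum % n = u := by
        rw [hS, Int.add_mul_emod_self_left, Int.emod_eq_of_lt (by omega) (by omega)]
      omega
    · -- n odd
      left
      refine ⟨hpar, ?_⟩
      have hqeven : q % 2 = 0 := by omega
      obtain ⟨t, htt⟩ : ∃ t, q = 2 * t := ⟨q / 2, by omega⟩
      have hS : sum = n * t := by nlinarith [hD]
      rw [hS]; exact Int.mul_emod_right n t

-- the unified test holds exactly when some a gives a run of length n
theorem pvCondB_iff (sum n : Int) (hn : 2 ≤ n) :
    pvCondB (2 * sum) n = true ↔ ∃ a : Int, n * (2 * a + n - 1) = 2 * sum := by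
  have hpos : (0:Int) < n := by omega
  have hne : n ≠ 0 := by omega
  simp only [pvCondB, PySem.Int.mod_eq_emod_of_pos hpos,
    PySem.Int.mod_eq_emod_of_pos (by norm_num : (0:Int) < 2),
    PySem.Int.floordiv_eq_ediv_of_pos hpos, Bool.and_eq_true, beq_iff_eq]
  constructor
  · rintro ⟨h0, h1⟩
    have hD : 2 * sum = n * (2 * sum / n) := by
      have := Int.ediv_add_emod (2 * sum) n; omega
    set q := 2 * sum / n with hq
    refine ⟨(q - n + 1) / 2, ?_⟩
    have hqeq : 2 * ((q - n + 1) / 2) + n - 1 = q := by omega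
    rw [hqeq]; omega
  · rintro ⟨a, ha⟩
    have hdvd : n ∣ 2 * sum := ⟨2 * a + n - 1, by linarith⟩
    have hq : 2 * sum / n = 2 * a + n - 1 := by
      rw [← ha, Int.mul_ediv_cancel_left _ hne]
    constructor
    · exact Int.emod_eq_zero_of_dvd hdvd
    · rw [hq]; omega

-- a run of length n fitting below the sqrt bound starts at a positive a
theorem pvAPos (sum n a : Int) (hn2 : 2 ≤ n) (hnn : n * n ≤ 2 * sum)
    (ha : n * (2 * a + n - 1) = 2 * sum) : 1 ≤ a := by
  by_contra hcon
  push_neg at hcon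
  have hle : n * (2 * a + n - 1) ≤ n * (n - 1) :=
    mul_le_mul_of_nonneg_left (by omega) (by omega)
  nlinarith

-- on accepted n, A's produced sequence is the run starting at a
theorem pvSeqA_eq (sum n a : Int) (hn : 2 ≤ n) (h : n * (2 * a + n - 1) = 2 * sum) :
    pvSeqA sum n = PySem.List.pyRange a (a + n) 1 := by
  have hpos : (0:Int) < n := by omega
  have hne : n ≠ 0 := by omega
  have hfirst : PySem.Int.floordiv sum n - PySem.Int.floordiv (n - 1) 2 = a := by
    rw [PySem.Int.floordiv_eq_ediv_of_pos hpos,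
      PySem.Int.floordiv_eq_ediv_of_pos (by norm_num : (0:Int) < 2)]
    rcases Int.emod_two_eq n with hpar | hpar
    · -- n even
      obtain ⟨u, huu⟩ : ∃ u, n = 2 * u := ⟨n / 2, by omega⟩
      have hS : sum = u + n * (a + u - 1) := by nlinarith
      have hdiv : sum / n = a + u - 1 := by
        rw [hS, Int.add_mul_ediv_left _ _ hne, Int.ediv_eq_zero_of_lt (by omega) (by omega)]
        ring
      rw [hdiv]; omega
    · -- n odd
      obtain ⟨t, htt⟩ : ∃ t, n = 2 * t + 1 := ⟨n / 2, by omega⟩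
      have hS : sum = n * (a + t) := by nlinarith
      have hdiv : sum / n = a + t := by rw [hS, Int.mul_ediv_cancel_left _ hne]
      rw [hdiv]; omega
  rw [pvSeqA, hfirst]

-- membership in A's output list
theorem pvMemA (sum : Int) (hs : 3 ≤ sum) (r : List Int) :
    (r ∈ ((PySem.List.pyRange 2 ((Nat.sqrt (2 * sum).toNat : Int) + 1) 1).filter
        (pvCondA sum)).map (pvSeqA sum)) ↔
      ∃ a e : Int, pvValid sum a e ∧ r = PySem.List.pyRange a (e + 1) 1 := by
  set M : Int := ((Nat.sqrt (2 * sum).toNat : Nat) : Int) with hM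
  constructor
  · intro hr
    obtain ⟨n, hn, hrn⟩ := List.mem_map.1 hr
    obtain ⟨hnr, hcond⟩ := List.mem_filter.1 hn
    obtain ⟨hn2, hnM⟩ := PySem.List.mem_pyRange_one.1 hnr
    obtain ⟨a, ha⟩ := (pvCondB_iff sum n hn2).1 ((pvCond_eq sum n hn2) ▸ hcond)
    have hnn : n * n ≤ 2 * sum := (pvle_sqrt (2 * sum) n (by omega) (by omega)).1 (by omega)
    have hapos : 1 ≤ a := pvAPos sum n a hn2 hnn ha
    refine ⟨a, a + n - 1, ⟨hapos, by omega, by linear_combination ha⟩, ?_⟩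
    rw [← hrn, pvSeqA_eq sum n a hn2 ha]
    congr 1
    omega
  · rintro ⟨a, e, ⟨ha, hae, heq⟩, hr⟩
    set n : Int := e - a + 1 with hn
    have hn2 : 2 ≤ n := by omega
    have hprod : n * (2 * a + n - 1) = 2 * sum := by rw [hn]; linear_combination heq
    have hnM : n ≤ M := by
      rw [hM]
      exact (pvle_sqrt (2 * sum) n (by omega) (by omega)).2 (by nlinarith)
    refine List.mem_map.2 ⟨n, List.mem_filter.2 ⟨PySem.List.mem_pyRange_one.2 ⟨hn2, by omega⟩,
      (pvCond_eq sum n hn2) ▸ ((pvCondB_iff sum n hn2).2 ⟨a, hprod⟩)⟩, ?_⟩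
    rw [pvSeqA_eq sum n a hn2 hprod, hr]
    congr 1
    omega

-- A's output list is strictly sorted by the start of the runs
theorem pvSortedA (sum : Int) (hs : 3 ≤ sum) :
    (((PySem.List.pyRange 2 ((Nat.sqrt (2 * sum).toNat : Int) + 1) 1).filter
        (pvCondA sum)).map (pvSeqA sum)).reverse.Pairwise
      (fun r s => r.headI < s.headI) := by
  set M : Int := ((Nat.sqrt (2 * sum).toNat : Nat) : Int) with hM
  rw [List.pairwise_reverse, List.pairwise_map]
  have hbase : ((PySem.List.pyRange 2 (M + 1) 1).filter (pvCondA sum)).Pairwise (· < ·) :=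
    (PySem.List.pairwise_lt_pyRange_one 2 (M + 1)).filter _
  refine hbase.imp_of_mem ?_
  intro n n' hmemn hmemn' hlt
  obtain ⟨hnr, hcond⟩ := List.mem_filter.1 hmemn
  obtain ⟨hnr', hcond'⟩ := List.mem_filter.1 hmemn'
  obtain ⟨hn2, hnM⟩ := PySem.List.mem_pyRange_one.1 hnr
  obtain ⟨hn2', hnM'⟩ := PySem.List.mem_pyRange_one.1 hnr'
  obtain ⟨a, ha⟩ := (pvCondB_iff sum n hn2).1 ((pvCond_eq sum n hn2) ▸ hcond)
  obtain ⟨a', ha'⟩ := (pvCondB_iff sum n' hn2').1 ((pvCond_eq sum n' hn2') ▸ hcond')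
  have hnn : n * n ≤ 2 * sum := (pvle_sqrt (2 * sum) n (by omega) (by omega)).1 (by omega)
  have hnn' : n' * n' ≤ 2 * sum := (pvle_sqrt (2 * sum) n' (by omega) (by omega)).1 (by omega)
  have hapos : 1 ≤ a := pvAPos sum n a hn2 hnn ha
  have hapos' : 1 ≤ a' := pvAPos sum n' a' hn2' hnn' ha'
  rw [pvSeqA_eq sum n a hn2 ha, pvSeqA_eq sum n' a' hn2' ha',
    pvHeadRange a (a + n) (by omega), pvHeadRange a' (a' + n') (by omega)]
  -- n < n' and both lengths valid ⇒ the longer run starts strictly earlier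
  by_contra hcon
  push_neg at hcon
  nlinarith [ha, ha']

-- ---------- B-side lemmas ----------

-- the 2-stripping loop: its result is odd, positive, and has the same odd divisors
theorem pvOddPart_spec : ∀ (f : Nat) (x : Int), 1 ≤ x → x ≤ (f : Int) →
    1 ≤ pvOddPart f x ∧ pvOddPart f x % 2 = 1 ∧
      ∀ d : Int, d % 2 = 1 → (d ∣ pvOddPart f x ↔ d ∣ x) := by
  intro f
  induction f with
  | zero =>
    intro x hx hf
    simp only [Nat.cast_zero] at hf
    omega
  | succ f ih =>
    intro x hx hf
    rw [pvOddPart]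
    by_cases hev : PySem.Int.mod x 2 == 0
    · rw [if_pos hev]
      have hmod : x % 2 = 0 := by
        have := PySem.Int.mod_eq_emod_of_pos (show (0:Int) < 2 by norm_num) (a := x)
        simpa [this] using hev
      have hdiv : PySem.Int.floordiv x 2 = x / 2 :=
        PySem.Int.floordiv_eq_ediv_of_pos (by norm_num)
      rw [hdiv]
      obtain ⟨h1, h2, h3⟩ := ih (x / 2) (by omega) (by push_cast at hf ⊢; omega)
      refine ⟨h1, h2, fun d hd => (h3 d hd).trans ?_⟩
      constructor
      · intro hdy
        exact Dvd.dvd.trans hdy ⟨2, by omega⟩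
      · intro hdx
        have h2x : d ∣ 2 * (x / 2) := by
          obtain ⟨t, ht⟩ := hdx
          exact ⟨t, by omega⟩
        exact pvOddDvd d (x / 2) hd h2x
    · rw [if_neg hev]
      have hmod : ¬ x % 2 = 0 := by
        have := PySem.Int.mod_eq_emod_of_pos (show (0:Int) < 2 by norm_num) (a := x)
        simpa [this] using hev
      exact ⟨hx, by omega, fun d _ => Iff.rfl⟩

-- one block of the divisor-pair enumeration
def pvDivBlock (o i : Int) : List Int :=
  if PySem.Int.mod o i == 0 then
    (if i * i ≠ o then [i, PySem.Int.floordiv o i] else [i])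
  else []

-- the foldl of pvDivStep is the concatenation of the blocks
theorem pvDivFold (o : Int) : ∀ (l : List Int) (acc : List Int),
    l.foldl (pvDivStep o) acc = acc ++ l.flatMap (pvDivBlock o) := by
  intro l
  induction l with
  | nil => intro acc; simp
  | cons i t ih =>
    intro acc
    rw [List.foldl_cons, ih, List.flatMap_cons]
    unfold pvDivStep pvDivBlock
    split_ifs <;> simp

-- a factor of a positive product with positive cofactor is positive
theorem pvPosFactor (x y z : Int) (h : x * y = z) (hy : 1 ≤ y) (hz : 1 ≤ z) : 1 ≤ x := by
  by_contra hcon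
  push_neg at hcon
  have h2 : x * y ≤ 0 * y := mul_le_mul_of_nonneg_right (by omega) (by omega)
  rw [zero_mul] at h2
  omega

-- elements of one divisor block
theorem pvBlock_cases (o i d : Int) (hd : d ∈ pvDivBlock o i) :
    i ∣ o ∧ (d = i ∨ (i * i ≠ o ∧ d = PySem.Int.floordiv o i)) := by
  unfold pvDivBlock at hd
  split_ifs at hd with hdvd hne
  · have hio : i ∣ o := (PySem.Int.mod_eq_zero_iff_dvd o i).1 (by simpa using hdvd)
    simp only [List.mem_cons, List.not_mem_nil, or_false] at hd
    exact ⟨hio, hd.imp_right (fun h => ⟨hne, h⟩)⟩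
  · have hio : i ∣ o := (PySem.Int.mod_eq_zero_iff_dvd o i).1 (by simpa using hdvd)
    simp only [List.mem_singleton] at hd
    exact ⟨hio, Or.inl hd⟩
  · simp at hd

-- the cofactor o // i of a divisor i of o
theorem pvCofactor (o i : Int) (ho : 1 ≤ o) (hi1 : 1 ≤ i) (hio : i ∣ o) :
    PySem.Int.floordiv o i * i = o ∧ 1 ≤ PySem.Int.floordiv o i := by
  rw [PySem.Int.floordiv_eq_ediv_of_pos (by omega)]
  have hcan : o / i * i = o := Int.ediv_mul_cancel hio
  exact ⟨hcan, pvPosFactor (o / i) i o hcan (by omega) (by omega)⟩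

-- a proper small divisor's cofactor lies beyond the square root
theorem pvCofactor_big (o i : Int) (ho : 1 ≤ o) (hi1 : 1 ≤ i) (hio : i ∣ o)
    (hlt : i * i < o) : ((Nat.sqrt o.toNat : Nat) : Int) < PySem.Int.floordiv o i := by
  obtain ⟨hcan, hq1⟩ := pvCofactor o i ho hi1 hio
  set q := PySem.Int.floordiv o i with hq
  have hiq : i < q := by nlinarith
  have hqq : o < q * q := by nlinarith
  by_contra hcon
  push_neg at hcon
  have := (pvle_sqrt o q (by omega) (by omega)).1 hcon
  omega

-- membership in the collected divisor list
theorem pvDiv_mem (o d : Int) (ho : 1 ≤ o) :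
    d ∈ (PySem.List.pyRange 1 ((Nat.sqrt o.toNat : Int) + 1) 1).flatMap (pvDivBlock o) ↔
      1 ≤ d ∧ d ∣ o := by
  rw [List.mem_flatMap]
  constructor
  · rintro ⟨i, hir, hib⟩
    obtain ⟨hi1, hiK⟩ := PySem.List.mem_pyRange_one.1 hir
    obtain ⟨hio, hcases⟩ := pvBlock_cases o i d hib
    obtain ⟨hcan, hq1⟩ := pvCofactor o i ho hi1 hio
    rcases hcases with rfl | ⟨hne, rfl⟩
    · exact ⟨hi1, hio⟩
    · exact ⟨hq1, ⟨i, hcan.symm⟩⟩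
  · rintro ⟨hd1, hdvd⟩
    obtain ⟨t, ht⟩ := hdvd
    have ht1 : 1 ≤ t := pvPosFactor t d o (by rw [mul_comm]; omega) (by omega) (by omega)
    by_cases hdd : d * d ≤ o
    · refine ⟨d, PySem.List.mem_pyRange_one.2 ⟨hd1, by
        have := (pvle_sqrt o d (by omega) (by omega)).2 hdd
        omega⟩, ?_⟩
      unfold pvDivBlock
      rw [if_pos (by simp [(PySem.Int.mod_eq_zero_iff_dvd o d).2 ⟨t, ht⟩])]
      split_ifs with hne
      · simp
      · simp
    · push_neg at hdd
      have htd : t < d := by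
        by_contra hcon
        push_neg at hcon
        have : d * d ≤ d * t := mul_le_mul_of_nonneg_left hcon (by omega)
        omega
      have htt : t * t < o := by nlinarith
      have httK : t ≤ ((Nat.sqrt o.toNat : Nat) : Int) :=
        (pvle_sqrt o t (by omega) (by omega)).2 (le_of_lt htt)
      refine ⟨t, PySem.List.mem_pyRange_one.2 ⟨ht1, by omega⟩, ?_⟩
      have htdvd : t ∣ o := ⟨d, by linarith⟩
      unfold pvDivBlock
      rw [if_pos (by simp [(PySem.Int.mod_eq_zero_iff_dvd o t).2 htdvd])]
      rw [if_pos (by intro he; omega)]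
      have hqt : PySem.Int.floordiv o t = d := by
        rw [PySem.Int.floordiv_eq_ediv_of_pos (by omega), ht, mul_comm,
          Int.mul_ediv_cancel_left _ (by omega : t ≠ 0)]
      simp [hqt]

-- the collected divisor list has no duplicates
theorem pvDiv_nodup (o : Int) (ho : 1 ≤ o) :
    ((PySem.List.pyRange 1 ((Nat.sqrt o.toNat : Int) + 1) 1).flatMap (pvDivBlock o)).Nodup := by
  set K : Int := ((Nat.sqrt o.toNat : Nat) : Int) with hK
  rw [List.nodup_flatMap]
  constructor
  · intro i hir
    obtain ⟨hi1, hiK⟩ := PySem.List.mem_pyRange_one.1 hir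
    unfold pvDivBlock
    split_ifs with hdvd hne
    · have hio : i ∣ o := (PySem.Int.mod_eq_zero_iff_dvd o i).1 (by simpa using hdvd)
      obtain ⟨hcan, hq1⟩ := pvCofactor o i ho hi1 hio
      simp only [List.nodup_cons, List.mem_singleton, List.not_mem_nil, not_false_iff,
        List.nodup_nil, and_true, List.mem_cons, or_false]
      intro he
      rw [← he] at hcan
      exact hne (by omega)
    · simp
    · simp
  · refine (PySem.List.pairwise_lt_pyRange_one 1 (K + 1)).imp_of_mem ?_
    intro i j hmi hmj hij
    obtain ⟨hi1, hiK⟩ := PySem.List.mem_pyRange_one.1 hmi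
    obtain ⟨hj1, hjK⟩ := PySem.List.mem_pyRange_one.1 hmj
    intro d hdi hdj
    obtain ⟨hio, hci⟩ := pvBlock_cases o i d hdi
    obtain ⟨hjo, hcj⟩ := pvBlock_cases o j d hdj
    have hii : i * i ≤ o := (pvle_sqrt o i (by omega) (by omega)).1 (by omega)
    have hjj : j * j ≤ o := (pvle_sqrt o j (by omega) (by omega)).1 (by omega)
    obtain ⟨hcani, hqi1⟩ := pvCofactor o i ho hi1 hio
    obtain ⟨hcanj, hqj1⟩ := pvCofactor o j ho hj1 hjo
    rcases hci with rfl | ⟨hnei, rfl⟩ <;> rcases hcj with hdj' | ⟨hnej, hdj'⟩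
    · omega
    · have := pvCofactor_big o j ho hj1 hjo (by omega)
      omega
    · have := pvCofactor_big o i ho hi1 hio (by omega)
      omega
    · have := pvCofactor_big o i ho hi1 hio (by omega)
      rw [← hdj'] at hcanj
      have hij' : PySem.Int.floordiv o i * i = PySem.Int.floordiv o i * j := by omega
      have := mul_left_cancel₀ (show PySem.Int.floordiv o i ≠ 0 by omega) hij'
      omega

-- a pair (first, length) describing a sequence with total sum
def pvGoodPair (sum : Int) (p : Int × Int) : Prop := pvValid sum p.1 (p.1 + p.2 - 1)

-- exact division through pvMkRun: the cofactor c = 2*sum // d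
theorem pvFloordivCancel (x y : Int) (hy : 0 < y) : PySem.Int.floordiv (y * x) y = x := by
  rw [PySem.Int.floordiv_eq_ediv_of_pos hy, Int.mul_ediv_cancel_left _ (by omega)]

-- doubling a factorization
theorem pvTwoMul (d s0 sum : Int) (h : sum = d * s0) : 2 * sum = d * (2 * s0) := by
  have h2 : d * (2 * s0) = 2 * (d * s0) := by ring
  omega

-- every odd divisor 1 < d of sum yields a valid sequence pair
theorem pvMkRun_good (sum d : Int) (hs : 3 ≤ sum) (hd : d % 2 = 1) (h1 : 1 < d)
    (hdvd : d ∣ sum) : pvGoodPair sum (pvMkRun sum d) := by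
  obtain ⟨s0, hss⟩ := hdvd
  have hs01 : 1 ≤ s0 := pvPosFactor s0 d sum (by rw [mul_comm]; omega) (by omega) (by omega)
  have hc : PySem.Int.floordiv (2 * sum) d = 2 * s0 := by
    rw [pvTwoMul d s0 sum hss]
    exact pvFloordivCancel (2 * s0) d (by omega)
  simp only [pvMkRun, pvGoodPair, pvValid]
  rw [hc]
  have hdc : d * (2 * s0) = 2 * sum := (pvTwoMul d s0 sum hss).symm
  by_cases hlt : d < 2 * s0
  · rw [if_pos hlt]
    have ha : PySem.Int.floordiv (d + 2 * s0 - 2 * d + 1) 2 = (2 * s0 - d + 1) / 2 := by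
      rw [PySem.Int.floordiv_eq_ediv_of_pos (by norm_num)]
      congr 1
      omega
    rw [ha]
    refine ⟨by omega, by omega, ?_⟩
    have h2a : 2 * ((2 * s0 - d + 1) / 2) = 2 * s0 - d + 1 := by omega
    nlinarith [h2a]
  · rw [if_neg hlt]
    have hne : d ≠ 2 * s0 := by omega
    have ha : PySem.Int.floordiv (d + 2 * s0 - 2 * (2 * s0) + 1) 2 = (d - 2 * s0 + 1) / 2 := by
      rw [PySem.Int.floordiv_eq_ediv_of_pos (by norm_num)]
      congr 1
      omega
    rw [ha]
    refine ⟨by omega, by omega, ?_⟩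
    have h2a : 2 * ((d - 2 * s0 + 1) / 2) = d - 2 * s0 + 1 := by omega
    nlinarith [h2a]

-- every valid sequence pair comes from exactly one odd divisor 1 < d of sum
theorem pvMkRun_surj (sum a n : Int) (hs : 3 ≤ sum) (hgood : pvGoodPair sum (a, n)) :
    ∃ d : Int, d % 2 = 1 ∧ 1 < d ∧ d ∣ sum ∧ pvMkRun sum d = (a, n) := by
  obtain ⟨ha1, hae, heq⟩ := hgood
  simp only at ha1 hae heq
  have hn2 : 2 ≤ n := by omega
  have hm : n * (2 * a + n - 1) = 2 * sum := by linear_combination heq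
  rcases Int.emod_two_eq n with hpar | hpar
  · -- n even: d = 2a + n - 1 (odd)
    refine ⟨2 * a + n - 1, by omega, by omega, ?_, ?_⟩
    · exact pvOddDvd (2 * a + n - 1) sum (by omega) ⟨n, by linarith⟩
    · have hc : PySem.Int.floordiv (2 * sum) (2 * a + n - 1) = n := by
        rw [show 2 * sum = (2 * a + n - 1) * n by linarith]
        exact pvFloordivCancel n (2 * a + n - 1) (by omega)
      simp only [pvMkRun]
      rw [hc, if_neg (by omega)]
      have ha' : PySem.Int.floordiv (2 * a + n - 1 + n - 2 * n + 1) 2 = a := by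
        rw [show 2 * a + n - 1 + n - 2 * n + 1 = 2 * a by ring]
        exact pvFloordivCancel a 2 (by norm_num)
      rw [ha']
  · -- n odd: d = n
    refine ⟨n, hpar, by omega, ?_, ?_⟩
    · exact pvOddDvd n sum hpar ⟨2 * a + n - 1, by linarith⟩
    · have hc : PySem.Int.floordiv (2 * sum) n = 2 * a + n - 1 := by
        rw [show 2 * sum = n * (2 * a + n - 1) by linarith]
        exact pvFloordivCancel (2 * a + n - 1) n (by omega)
      simp only [pvMkRun]
      rw [hc, if_pos (by omega)]
      have ha' : PySem.Int.floordiv (n + (2 * a + n - 1) - 2 * n + 1) 2 = a := by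
        rw [show n + (2 * a + n - 1) - 2 * n + 1 = 2 * a by ring]
        exact pvFloordivCancel a 2 (by norm_num)
      rw [ha']

-- distinct odd divisors yield distinct pairs
theorem pvMkRun_inj (sum d d' : Int) (hs : 3 ≤ sum) (hd : d % 2 = 1) (hd' : d' % 2 = 1)
    (h1 : 1 < d) (h1' : 1 < d') (hdvd : d ∣ sum) (hdvd' : d' ∣ sum)
    (heq : pvMkRun sum d = pvMkRun sum d') : d = d' := by
  obtain ⟨s0, hss⟩ := hdvd
  obtain ⟨s0', hss'⟩ := hdvd'
  have hs01 : 1 ≤ s0 := pvPosFactor s0 d sum (by rw [mul_comm]; omega) (by omega) (by omega)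
  have hs01' : 1 ≤ s0' := pvPosFactor s0' d' sum (by rw [mul_comm]; omega) (by omega) (by omega)
  have hc : PySem.Int.floordiv (2 * sum) d = 2 * s0 := by
    rw [pvTwoMul d s0 sum hss]
    exact pvFloordivCancel (2 * s0) d (by omega)
  have hc' : PySem.Int.floordiv (2 * sum) d' = 2 * s0' := by
    rw [pvTwoMul d' s0' sum hss']
    exact pvFloordivCancel (2 * s0') d' (by omega)
  simp only [pvMkRun] at heq
  rw [hc, hc'] at heq
  -- the second component is min(d, 2*s0) resp. min(d', 2*s0'); the first determines the max
  have hprod : d * (2 * s0) = d' * (2 * s0') := by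
    have t1 : d * s0 = sum := by omega
    have t2 : d' * s0' = sum := by omega
    nlinarith [t1, t2]
  by_cases hlt : d < 2 * s0 <;> by_cases hlt' : d' < 2 * s0'
  · rw [if_pos hlt, if_pos hlt'] at heq
    exact (Prod.mk.injEq _ _ _ _ ▸ heq).2
  · -- d (odd) would equal the even 2*s0': parity contradiction
    rw [if_pos hlt, if_neg hlt'] at heq
    obtain ⟨-, he2⟩ := Prod.mk.injEq _ _ _ _ ▸ heq
    omega
  · -- 2*s0 (even) would equal the odd d': parity contradiction
    rw [if_neg hlt, if_pos hlt'] at heq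
    obtain ⟨-, he2⟩ := Prod.mk.injEq _ _ _ _ ▸ heq
    omega
  · rw [if_neg hlt, if_neg hlt'] at heq
    obtain ⟨he1, he2⟩ := Prod.mk.injEq _ _ _ _ ▸ heq
    -- both pairs are (…, 2*s0) with the first component fixing d
    have hfe : PySem.Int.floordiv (d + 2 * s0 - 2 * (2 * s0) + 1) 2 = (d - 2 * s0 + 1) / 2 := by
      rw [PySem.Int.floordiv_eq_ediv_of_pos (by norm_num)]
      congr 1
      omega
    have hfe' : PySem.Int.floordiv (d' + 2 * s0' - 2 * (2 * s0') + 1) 2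
        = (d' - 2 * s0' + 1) / 2 := by
      rw [PySem.Int.floordiv_eq_ediv_of_pos (by norm_num)]
      congr 1
      omega
    rw [hfe, hfe'] at he1
    omega


-- the list of (first, length) pairs the port builds before sorting
def pvRunsList (sum : Int) : List (Int × Int) :=
  ((PySem.List.pyRange 1 ((Nat.sqrt (pvOddPart sum.toNat sum).toNat : Int) + 1) 1).foldl
      (pvDivStep (pvOddPart sum.toNat sum)) []).foldl
    (fun runs d => if 1 < d then runs ++ [pvMkRun sum d] else runs) []

-- the pair list holds exactly the valid sequence pairs, without duplicates
theorem pvRuns_spec (sum : Int) (hs : 3 ≤ sum) :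
    (∀ p : Int × Int, p ∈ pvRunsList sum ↔ pvGoodPair sum p) ∧ (pvRunsList sum).Nodup := by
  have hsum_t : ((sum.toNat : Nat) : Int) = sum := Int.toNat_of_nonneg (by omega)
  obtain ⟨ho1, ho2, ho3⟩ :=
    pvOddPart_spec sum.toNat sum (by omega) (le_of_eq hsum_t.symm)
  set o : Int := pvOddPart sum.toNat sum with ho
  set K : Int := ((Nat.sqrt o.toNat : Nat) : Int) with hK
  have hlist : pvRunsList sum =
      (((PySem.List.pyRange 1 (K + 1) 1).flatMap (pvDivBlock o)).filter
        (fun d => decide (1 < d))).map (pvMkRun sum) := by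
    have hbody : (fun (runs : List (Int × Int)) (d : Int) =>
          if 1 < d then runs ++ [pvMkRun sum d] else runs)
        = (fun runs d =>
          if (fun d : Int => decide (1 < d)) d = true then runs ++ [pvMkRun sum d] else runs) := by
      funext runs d
      by_cases h : 1 < d <;> simp [h]
    rw [pvRunsList, pvDivFold o _ [], hbody, PySem.List.foldl_append_if]
    simp [← ho]
    rw [hK]
  -- facts about a divisor entry
  have hdfacts : ∀ d : Int, d ∈ (PySem.List.pyRange 1 (K + 1) 1).flatMap (pvDivBlock o) →
      1 < d → d % 2 = 1 ∧ d ∣ sum := by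
    intro d hdmem h1
    obtain ⟨hd1, hdo⟩ := (pvDiv_mem o d ho1).1 hdmem
    have hdodd : d % 2 = 1 := by
      rcases Int.emod_two_eq d with hpar | hpar
      · exfalso
        obtain ⟨t, ht⟩ := hdo
        have h2 : o = 2 * (d / 2 * t) := by
          have hdd : d = 2 * (d / 2) := by omega
          rw [ht]
          nlinarith [hdd]
        omega
      · exact hpar
    exact ⟨hdodd, (ho3 d hdodd).1 hdo⟩
  constructor
  · intro p
    rw [hlist, List.mem_map]
    constructor
    · rintro ⟨d, hd, rfl⟩
      obtain ⟨hdmem, hdec⟩ := List.mem_filter.1 hd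
      have h1 : 1 < d := by simpa using hdec
      obtain ⟨hdodd, hdsum⟩ := hdfacts d hdmem h1
      exact pvMkRun_good sum d hs hdodd h1 hdsum
    · intro hgood
      obtain ⟨a, n⟩ := p
      obtain ⟨d, hdodd, h1, hdsum, hmk⟩ := pvMkRun_surj sum a n hs hgood
      refine ⟨d, List.mem_filter.2 ⟨?_, by simpa using h1⟩, hmk⟩
      exact (pvDiv_mem o d ho1).2 ⟨by omega, (ho3 d hdodd).2 hdsum⟩
  · rw [hlist]
    refine List.Nodup.map_on ?_ ((pvDiv_nodup o ho1).filter _)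
    intro x hx y hy hxy
    obtain ⟨hxmem, hxdec⟩ := List.mem_filter.1 hx
    obtain ⟨hymem, hydec⟩ := List.mem_filter.1 hy
    have hx1 : 1 < x := by simpa using hxdec
    have hy1 : 1 < y := by simpa using hydec
    obtain ⟨hxodd, hxsum⟩ := hdfacts x hxmem hx1
    obtain ⟨hyodd, hysum⟩ := hdfacts y hymem hy1
    exact pvMkRun_inj sum x y hs hxodd hyodd hx1 hy1 hxsum hysum hxy


-- ===== VERDICT (by name: the statement is the Claim_ definition above) =====
theorem FindContinuousSequence4_spec : Claim_equal_FindContinuousSequence4 := by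
  unfold Claim_equal_FindContinuousSequence4 Spec_FindContinuousSequence4
  intro sum _
  by_cases hlt : sum < 3
  · simp [FindContinuousSequence4, FindContinuousSequence4_alt, hlt]
  · push_neg at hlt
    have hs : 3 ≤ sum := hlt
    have hA : FindContinuousSequence4 sum =
        (((PySem.List.pyRange 2 ((Nat.sqrt (2 * sum).toNat : Int) + 1) 1).filter
          (pvCondA sum)).map (pvSeqA sum)).reverse := by
      rw [FindContinuousSequence4, if_neg (by omega)]
      rw [PySem.List.pyRange_neg_one_eq_reverse, PySem.List.foldl_append_if]
      simp
    have hBeq : FindContinuousSequence4_alt sum =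
        (PySem.List.sorted (pvRunsList sum) (fun t => t.1) false).map
          (fun t => PySem.List.pyRange t.1 (t.1 + t.2) 1) := by
      rw [FindContinuousSequence4_alt, if_neg (by omega)]
      rfl
    obtain ⟨hmem, hnd⟩ := pvRuns_spec sum hs
    have hndS : (PySem.List.sorted (pvRunsList sum) (fun t => t.1) false).Nodup :=
      (PySem.List.sorted_perm (pvRunsList sum) (fun t => t.1) false).nodup_iff.2 hnd
    have hps : (PySem.List.sorted (pvRunsList sum) (fun t => t.1) false).Pairwise
        (fun x y => x.1 < y.1) := by
      refine ((PySem.List.sorted_pairwise (pvRunsList sum) (fun t => t.1)).and hndS).imp_of_mem ?_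
      rintro x y hx hy ⟨hle, hne⟩
      rcases lt_or_eq_of_le hle with h | h
      · exact h
      · exfalso
        apply hne
        obtain ⟨hax, haex, heqx⟩ :=
          (hmem x).1 ((PySem.List.mem_sorted _ _ _ _).1 hx)
        obtain ⟨hay, haey, heqy⟩ :=
          (hmem y).1 ((PySem.List.mem_sorted _ _ _ _).1 hy)
        rw [← h] at haey heqy
        have hee := pvEndUnique sum x.1 (x.1 + x.2 - 1) (x.1 + y.2 - 1) haex haey heqx heqy hax
        have h2 : x.2 = y.2 := by omega
        exact Prod.ext h h2
    have hsortB : ((PySem.List.sorted (pvRunsList sum) (fun t => t.1) false).map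
        (fun t => PySem.List.pyRange t.1 (t.1 + t.2) 1)).Pairwise
        (fun r s => r.headI < s.headI) := by
      rw [List.pairwise_map]
      refine hps.imp_of_mem ?_
      intro x y hx hy hltxy
      obtain ⟨hax, haex, -⟩ := (hmem x).1 ((PySem.List.mem_sorted _ _ _ _).1 hx)
      obtain ⟨hay, haey, -⟩ := (hmem y).1 ((PySem.List.mem_sorted _ _ _ _).1 hy)
      rw [pvHeadRange x.1 (x.1 + x.2) (by omega), pvHeadRange y.1 (y.1 + y.2) (by omega)]
      exact hltxy
    have hmemB : ∀ r : List Int,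
        r ∈ (PySem.List.sorted (pvRunsList sum) (fun t => t.1) false).map
          (fun t => PySem.List.pyRange t.1 (t.1 + t.2) 1) ↔
        ∃ a e : Int, pvValid sum a e ∧ r = PySem.List.pyRange a (e + 1) 1 := by
      intro r
      rw [List.mem_map]
      constructor
      · rintro ⟨p, hp, rfl⟩
        obtain ⟨hap, haep, heqp⟩ := (hmem p).1 ((PySem.List.mem_sorted _ _ _ _).1 hp)
        refine ⟨p.1, p.1 + p.2 - 1, ⟨hap, haep, heqp⟩, ?_⟩
        congr 1
        omega
      · rintro ⟨a, e, hv, rfl⟩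
        refine ⟨(a, e - a + 1), (PySem.List.mem_sorted _ _ _ _).2 ((hmem _).2 ?_), ?_⟩
        · show pvValid sum a (a + (e - a + 1) - 1)
          rw [show a + (e - a + 1) - 1 = e by omega]
          exact hv
        · show PySem.List.pyRange a (a + (e - a + 1)) 1 = PySem.List.pyRange a (e + 1) 1
          congr 1
          omega
    rw [hA, hBeq]
    refine List.Perm.eq_of_pairwise
      (fun a b _ _ hab hba => absurd (hab.trans hba) (lt_irrefl _)) (pvSortedA sum hs) hsortB ?_
    refine (List.perm_ext_iff_of_nodup ?_ ?_).2 ?_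
    · exact (pvSortedA sum hs).imp (fun {a b} hab heq => absurd (heq ▸ hab) (lt_irrefl _))
    · exact hsortB.imp (fun {a b} hab heq => absurd (heq ▸ hab) (lt_irrefl _))
    · intro r
      exact (List.mem_reverse.trans (pvMemA sum hs r)).trans (hmemB r).symm
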